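-- pv_equiv track=rewrite | github.com/hotteok00/Algorithm | 프로그래머스/0/181916. 주사위 게임 3/주사위 게임 3.py | check
-- ===== SOURCE A (Python) =====
-- def check(a, b, c, d):
--     set_abcd = set([a, b, c, d])
--
--     # same 4            p, q, 0, 1
--     if len(set_abcd) == 1: return a, a, 0, 1
--
--     if len(set_abcd) == 2:
--         tmp = [0 for _ in range(7)]
--         for i in [a, b, c, d]:
--             tmp[i] += 1
--
--         if 3 in tmp:
--             # same 3, 1         p, q, 0, 2
--             return tmp.index(3), tmp.index(1), 0, 2
--         else:
--             # same 2, same 2    p, q, 0, 3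
--             set_abcd = list(set_abcd)
--             return set_abcd[0], set_abcd[1], 0, 3
--
--     # same 2, 1, 1      0, q, r, 4
--     if len(set_abcd) == 3:
--         if a == b: return 0, c, d, 4
--         if a == c: return 0, b, d, 4
--         if a == d: return 0, b, c, 4
--         if b == c: return 0, a, d, 4
--         if b == d: return 0, a, c, 4
--         if c == d: return 0, a, b, 4
--
--     # 1, 1, 1, 1        0, 0, 0, 5
--     return 0, 0, 0, 5
-- ===== SOURCE B (Python) =====
-- def _cx(p, q):
--     return (p, q) if p <= q else (q, p)
--
--
-- def _sort4(a, b, c, d):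
--     w, x = _cx(a, b)
--     y, z = _cx(c, d)
--     w, y = _cx(w, y)
--     x, z = _cx(x, z)
--     x, y = _cx(x, y)
--     return w, x, y, z
--
--
-- def check(a, b, c, d):
--     # Sort the four values with a 5-comparator sorting network, then read the
--     # hand pattern off adjacent equalities in the sorted quadruple.
--     w, x, y, z = _sort4(a, b, c, d)
--     if w == z:                      # all four equal
--         return a, a, 0, 1
--     if w == y:                      # low triple + high single
--         return w, z, 0, 2
--     if x == z:                      # high triple + low single
--         return x, w, 0, 2
--     if w == x and y == z:           # two pairs (ascending)
--         return w, y, 0, 3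
--     if w == x or x == y or y == z:  # one pair + two singles
--         p = x if w == x else y
--         s = [v for v in (a, b, c, d) if v != p]
--         return 0, s[0], s[1], 4
--     return 0, 0, 0, 5               # all different
-- ===== Notes on version B (the rewrite author's own statement) =====
-- stated objective: alternative
-- what changed: B first sorts the four values with a 5-comparator sorting network and then reads the hand pattern off adjacent equalities in the sorted quadruple, instead of A's branching on the size of the value set with a 7-slot counting array, list.index calls and a six-way equality chain.
-- intended difference: On tuples with exactly two distinct values, all in -7..6, a 3+1 split and at least one negative value, A returns the wrapped tmp array indices (negative value + 7) as the dice values while B returns the actual triple and single values, which is the intended scoring. — e.g. on check(-1, -1, -1, 3): A returns (6, 3, 0, 2), B returns (-1, 3, 0, 2)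
-- outside the precondition, e.g. on check(-1, -1, 2, 2): A returns (2, -1, 0, 3), B returns (-1, 2, 0, 3); on check(-1, -1, -1, 6): A returns (-1, 6, 0, 3), B returns (-1, 6, 0, 2); on check(7, 7, 1, 1): A raises IndexError, B returns (1, 7, 0, 3)
import Mathlib
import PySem

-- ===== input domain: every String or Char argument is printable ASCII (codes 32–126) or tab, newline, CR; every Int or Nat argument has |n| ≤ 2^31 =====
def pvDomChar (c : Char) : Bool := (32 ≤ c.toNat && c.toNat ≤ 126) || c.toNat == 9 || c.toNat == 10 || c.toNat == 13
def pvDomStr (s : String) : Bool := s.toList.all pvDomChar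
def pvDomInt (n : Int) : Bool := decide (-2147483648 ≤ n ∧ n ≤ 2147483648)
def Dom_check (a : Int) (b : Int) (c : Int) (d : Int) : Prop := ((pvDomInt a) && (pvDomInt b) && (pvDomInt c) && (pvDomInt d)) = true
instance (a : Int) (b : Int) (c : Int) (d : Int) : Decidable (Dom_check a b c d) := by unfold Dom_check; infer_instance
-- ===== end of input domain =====

-- B sorts the four values with a 5-comparator sorting network and reads the hand pattern off
-- adjacent equalities in the sorted quadruple, instead of A's set-size branching with a 7-slot
-- counting array, list.index calls and a six-way equality chain (objective: alternative).

-- ===== PORT A =====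
-- CPython iterates a set of distinct small non-negative ints 0..6 (hash = value, table size 8,
-- no collisions) in ascending order; this hand-ports `list(set_abcd)` EXACTLY for sets whose
-- elements are distinct ints in 0..6 — the only sets reaching that line of A inside Pre_check.
def pySmallIntSetList (s : PySem.Set Int) : List Int := PySem.List.sorted s (fun x => x) false

def check (a : Int) (b : Int) (c : Int) (d : Int) : Int × Int × Int × Int :=
  let set_abcd := PySem.Set.ofList [a, b, c, d]
  if set_abcd.length = 1 then (a, a, 0, 1)
  else if set_abcd.length = 2 then
    -- tmp = [0 for _ in range(7)]; for i in [a,b,c,d]: tmp[i] += 1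
    -- tmp[i] is exact (incl. negative-index wraparound) via pyGetD/pySetD under Pre_check,
    -- which guarantees Raise.InRange 7 i; out of range Python raises IndexError (excluded).
    let tmp : List Int := [a, b, c, d].foldl
      (fun t i => PySem.List.pySetD t i (PySem.List.pyGetD t i 0 + 1))
      (List.replicate 7 0)
    if tmp.contains 3 then
      -- tmp.index(3), tmp.index(1): both present here, so .getD 0 is never taken
      (((PySem.List.index? tmp 3).getD 0 : Nat), ((PySem.List.index? tmp 1).getD 0 : Nat), 0, 2)
    else
      -- set_abcd = list(set_abcd); return set_abcd[0], set_abcd[1], 0, 3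
      let l := pySmallIntSetList set_abcd
      ((PySem.List.pyGet? l 0).getD 0, (PySem.List.pyGet? l 1).getD 0, 0, 3)
  else if set_abcd.length = 3 then
    if a = b then (0, c, d, 4)
    else if a = c then (0, b, d, 4)
    else if a = d then (0, b, c, 4)
    else if b = c then (0, a, d, 4)
    else if b = d then (0, a, c, 4)
    else if c = d then (0, a, b, 4)
    else (0, 0, 0, 5)   -- Python falls through to the final return (unreachable when 3 distinct)
  else (0, 0, 0, 5)

-- ===== PORT B =====
-- compare-exchange: (p, q) if p <= q else (q, p)
def cx (p q : Int) : Int × Int := if p ≤ q then (p, q) else (q, p)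

-- 5-comparator sorting network over the four values
def sort4 (a b c d : Int) : Int × Int × Int × Int :=
  let wx := cx a b
  let yz := cx c d
  let wy := cx wx.1 yz.1
  let xz := cx wx.2 yz.2
  let xy := cx wy.2 xz.1
  (wy.1, xy.1, xy.2, xz.2)

def check_alt (a : Int) (b : Int) (c : Int) (d : Int) : Int × Int × Int × Int :=
  let s4 := sort4 a b c d
  let w := s4.1
  let x := s4.2.1
  let y := s4.2.2.1
  let z := s4.2.2.2
  if w = z then (a, a, 0, 1)
  else if w = y then (w, z, 0, 2)
  else if x = z then (x, w, 0, 2)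
  else if w = x ∧ y = z then (w, y, 0, 3)
  else if w = x ∨ x = y ∨ y = z then
    let p := if w = x then x else y
    let s := [a, b, c, d].filter (fun v => v ≠ p)
    -- s[0], s[1]: exactly two singletons exist in this branch, so .getD 0 is never taken
    (0, (PySem.List.pyGet? s 0).getD 0, (PySem.List.pyGet? s 1).getD 0, 4)
  else (0, 0, 0, 5)

-- ===== PRECONDITION & SPEC =====
-- Pre_check excludes tuples with exactly two distinct values unless all values lie in 0..6, or
-- all lie in -7..6 with a 3+1 split and no two distinct values congruent mod 7: outside that,
-- A either raises IndexError (a value ≥ 7 or ≤ -8 hits tmp[i]) or returns `list(set)` of a set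
-- containing a negative int, whose CPython hash-iteration order is an unmatchable artefact.
def Pre_check (a : Int) (b : Int) (c : Int) (d : Int) : Prop :=
  (PySem.Set.ofList [a, b, c, d]).length = 2 →
    ((0 ≤ a ∧ a ≤ 6 ∧ 0 ≤ b ∧ b ≤ 6 ∧ 0 ≤ c ∧ c ≤ 6 ∧ 0 ≤ d ∧ d ≤ 6) ∨
     (-7 ≤ a ∧ a ≤ 6 ∧ -7 ≤ b ∧ b ≤ 6 ∧ -7 ≤ c ∧ c ≤ 6 ∧ -7 ≤ d ∧ d ≤ 6 ∧
      (PySem.List.count [a, b, c, d] a = 3 ∨ PySem.List.count [a, b, c, d] a = 1) ∧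
      (a ≠ b → (a - b) % 7 ≠ 0) ∧ (a ≠ c → (a - c) % 7 ≠ 0) ∧ (a ≠ d → (a - d) % 7 ≠ 0) ∧
      (b ≠ c → (b - c) % 7 ≠ 0) ∧ (b ≠ d → (b - d) % 7 ≠ 0) ∧ (c ≠ d → (c - d) % 7 ≠ 0)))
instance (a : Int) (b : Int) (c : Int) (d : Int) : Decidable (Pre_check a b c d) := by
  unfold Pre_check; infer_instance
def pvWitness_check : Int × Int × Int × Int := (1, 1, 2, 2)

-- On tuples with exactly two distinct values, all in -7..6, a 3+1 split and a negative value,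
-- A returns the wrapped tmp indices (negative value + 7) instead of the dice values themselves,
-- while B returns the actual triple and single values, which is the intended scoring.
def D_check (a : Int) (b : Int) (c : Int) (d : Int) : Prop :=
  (PySem.Set.ofList [a, b, c, d]).length = 2 ∧
  -7 ≤ a ∧ a ≤ 6 ∧ -7 ≤ b ∧ b ≤ 6 ∧ -7 ≤ c ∧ c ≤ 6 ∧ -7 ≤ d ∧ d ≤ 6 ∧
  (a < 0 ∨ b < 0 ∨ c < 0 ∨ d < 0) ∧
  (PySem.List.count [a, b, c, d] a = 3 ∨ PySem.List.count [a, b, c, d] a = 1)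
instance (a : Int) (b : Int) (c : Int) (d : Int) : Decidable (D_check a b c d) := by
  unfold D_check; infer_instance

def Spec_check (a : Int) (b : Int) (c : Int) (d : Int) (out : Int × Int × Int × Int) : Prop :=
  ¬ D_check a b c d → out = check_alt a b c d
instance (a : Int) (b : Int) (c : Int) (d : Int) (out : Int × Int × Int × Int) : Decidable (Spec_check a b c d out) := by unfold Spec_check; infer_instance

def pvDiffWitness_check : Int × Int × Int × Int := (-1, -1, -1, 3)
def pvDiffWitnessOut_check : (Int × Int × Int × Int) × (Int × Int × Int × Int) :=
  ((6, 3, 0, 2), (-1, 3, 0, 2))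

-- ===== CLAIM (what is proved, stated in full; the proofs are below) =====
def Claim_unchanged_check : Prop := ∀ (a : Int) (b : Int) (c : Int) (d : Int), Dom_check a b c d → Pre_check a b c d → Spec_check a b c d (check a b c d)
def Claim_changed_check : Prop := Dom_check (pvDiffWitness_check.1) (pvDiffWitness_check.2.1) (pvDiffWitness_check.2.2.1) (pvDiffWitness_check.2.2.2) ∧ Pre_check (pvDiffWitness_check.1) (pvDiffWitness_check.2.1) (pvDiffWitness_check.2.2.1) (pvDiffWitness_check.2.2.2) ∧ D_check (pvDiffWitness_check.1) (pvDiffWitness_check.2.1) (pvDiffWitness_check.2.2.1) (pvDiffWitness_check.2.2.2) ∧ check (pvDiffWitness_check.1) (pvDiffWitness_check.2.1) (pvDiffWitness_check.2.2.1) (pvDiffWitness_check.2.2.2) = pvDiffWitnessOut_check.1 ∧ check_alt (pvDiffWitness_check.1) (pvDiffWitness_check.2.1) (pvDiffWitness_check.2.2.1) (pvDiffWitness_check.2.2.2) = pvDiffWitnessOut_check.2 ∧ pvDiffWitnessOut_check.1 ≠ pvDiffWitnessOut_check.2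
def Claim_exact_check : Prop := ∀ (a : Int) (b : Int) (c : Int) (d : Int), Dom_check a b c d → Pre_check a b c d → D_check a b c d → check a b c d ≠ check_alt a b c d

-- ===== LEMMAS AND PROOFS =====

-- shape lemmas: the value of check_alt on each multiset shape of the four dice
set_option maxHeartbeats 1000000 in
theorem alt_pair12 (x y z : Int) (hxy : x ≠ y) (hxz : x ≠ z) (hyz : y ≠ z) :
    check_alt x x y z = (0, y, z, 4) := by
  rcases lt_or_gt_of_ne hxy with h1|h1 <;> rcases lt_or_gt_of_ne hxz with h2|h2 <;>
    rcases lt_or_gt_of_ne hyz with h3|h3 <;>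
    simp [check_alt, sort4, cx, List.filter, PySem.List.pyGet?, PySem.List.pyIdx?,
      hxy, hxz, hyz, Ne.symm hxy, Ne.symm hxz, Ne.symm hyz,
      h1.le, h2.le, h3.le, not_le.mpr h1, not_le.mpr h2, not_le.mpr h3,
      h1.ne, h2.ne, h3.ne, h1.ne', h2.ne', h3.ne'] <;> omega

set_option maxHeartbeats 1000000 in
theorem alt_pair13 (x y z : Int) (hxy : x ≠ y) (hxz : x ≠ z) (hyz : y ≠ z) :
    check_alt x y x z = (0, y, z, 4) := by
  rcases lt_or_gt_of_ne hxy with h1|h1 <;> rcases lt_or_gt_of_ne hxz with h2|h2 <;>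
    rcases lt_or_gt_of_ne hyz with h3|h3 <;>
    simp [check_alt, sort4, cx, List.filter, PySem.List.pyGet?, PySem.List.pyIdx?,
      hxy, hxz, hyz, Ne.symm hxy, Ne.symm hxz, Ne.symm hyz,
      h1.le, h2.le, h3.le, not_le.mpr h1, not_le.mpr h2, not_le.mpr h3,
      h1.ne, h2.ne, h3.ne, h1.ne', h2.ne', h3.ne'] <;> omega

set_option maxHeartbeats 1000000 in
theorem alt_pair14 (x y z : Int) (hxy : x ≠ y) (hxz : x ≠ z) (hyz : y ≠ z) :
    check_alt x y z x = (0, y, z, 4) := by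
  rcases lt_or_gt_of_ne hxy with h1|h1 <;> rcases lt_or_gt_of_ne hxz with h2|h2 <;>
    rcases lt_or_gt_of_ne hyz with h3|h3 <;>
    simp [check_alt, sort4, cx, List.filter, PySem.List.pyGet?, PySem.List.pyIdx?,
      hxy, hxz, hyz, Ne.symm hxy, Ne.symm hxz, Ne.symm hyz,
      h1.le, h2.le, h3.le, not_le.mpr h1, not_le.mpr h2, not_le.mpr h3,
      h1.ne, h2.ne, h3.ne, h1.ne', h2.ne', h3.ne'] <;> omega

set_option maxHeartbeats 1000000 in
theorem alt_pair23 (x y z : Int) (hxy : x ≠ y) (hxz : x ≠ z) (hyz : y ≠ z) :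
    check_alt y x x z = (0, y, z, 4) := by
  rcases lt_or_gt_of_ne hxy with h1|h1 <;> rcases lt_or_gt_of_ne hxz with h2|h2 <;>
    rcases lt_or_gt_of_ne hyz with h3|h3 <;>
    simp [check_alt, sort4, cx, List.filter, PySem.List.pyGet?, PySem.List.pyIdx?,
      hxy, hxz, hyz, Ne.symm hxy, Ne.symm hxz, Ne.symm hyz,
      h1.le, h2.le, h3.le, not_le.mpr h1, not_le.mpr h2, not_le.mpr h3,
      h1.ne, h2.ne, h3.ne, h1.ne', h2.ne', h3.ne'] <;> omega

set_option maxHeartbeats 1000000 in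
theorem alt_pair24 (x y z : Int) (hxy : x ≠ y) (hxz : x ≠ z) (hyz : y ≠ z) :
    check_alt y x z x = (0, y, z, 4) := by
  rcases lt_or_gt_of_ne hxy with h1|h1 <;> rcases lt_or_gt_of_ne hxz with h2|h2 <;>
    rcases lt_or_gt_of_ne hyz with h3|h3 <;>
    simp [check_alt, sort4, cx, List.filter, PySem.List.pyGet?, PySem.List.pyIdx?,
      hxy, hxz, hyz, Ne.symm hxy, Ne.symm hxz, Ne.symm hyz,
      h1.le, h2.le, h3.le, not_le.mpr h1, not_le.mpr h2, not_le.mpr h3,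
      h1.ne, h2.ne, h3.ne, h1.ne', h2.ne', h3.ne'] <;> omega

set_option maxHeartbeats 1000000 in
theorem alt_pair34 (x y z : Int) (hxy : x ≠ y) (hxz : x ≠ z) (hyz : y ≠ z) :
    check_alt y z x x = (0, y, z, 4) := by
  rcases lt_or_gt_of_ne hxy with h1|h1 <;> rcases lt_or_gt_of_ne hxz with h2|h2 <;>
    rcases lt_or_gt_of_ne hyz with h3|h3 <;>
    simp [check_alt, sort4, cx, List.filter, PySem.List.pyGet?, PySem.List.pyIdx?,
      hxy, hxz, hyz, Ne.symm hxy, Ne.symm hxz, Ne.symm hyz,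
      h1.le, h2.le, h3.le, not_le.mpr h1, not_le.mpr h2, not_le.mpr h3,
      h1.ne, h2.ne, h3.ne, h1.ne', h2.ne', h3.ne'] <;> omega

set_option maxHeartbeats 4000000 in
theorem alt_distinct (a b c d : Int) (hab : a ≠ b) (hac : a ≠ c) (had : a ≠ d)
    (hbc : b ≠ c) (hbd : b ≠ d) (hcd : c ≠ d) :
    check_alt a b c d = (0, 0, 0, 5) := by
  rcases lt_or_gt_of_ne hab with h1|h1 <;> rcases lt_or_gt_of_ne hac with h2|h2 <;>
    rcases lt_or_gt_of_ne had with h3|h3 <;> rcases lt_or_gt_of_ne hbc with h4|h4 <;>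
    rcases lt_or_gt_of_ne hbd with h5|h5 <;> rcases lt_or_gt_of_ne hcd with h6|h6 <;>
    first
      | omega
      | (simp [check_alt, sort4, cx,
          hab, hac, had, hbc, hbd, hcd, Ne.symm hab, Ne.symm hac, Ne.symm had,
          Ne.symm hbc, Ne.symm hbd, Ne.symm hcd,
          h1.le, h2.le, h3.le, h4.le, h5.le, h6.le,
          not_le.mpr h1, not_le.mpr h2, not_le.mpr h3, not_le.mpr h4, not_le.mpr h5,
          not_le.mpr h6] <;> omega)

-- ===== VERDICT (the pinned theorems, proved directly) =====
set_option maxHeartbeats 2000000 in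
theorem check_spec : Claim_unchanged_check := by
  intro a b c d _ hpre
  unfold Spec_check
  intro hnd
  by_cases hab : a = b
  · subst hab
    by_cases hac : a = c
    · subst hac
      by_cases had : a = d
      · subst had
        simp [check, check_alt, sort4, cx, PySem.Set.ofList, PySem.Set.add, PySem.Set.contains, List.foldl]
      · -- a a a d
        have hlen : (PySem.Set.ofList [a, a, a, d]).length = 2 := by
          simp only [PySem.Set.ofList, PySem.Set.add, PySem.Set.contains, List.foldl]
          split_ifs <;> simp_all <;> tauto
        have hb : 0 ≤ a ∧ a ≤ 6 ∧ 0 ≤ d ∧ d ≤ 6 := by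
          rcases hpre hlen with h | h
          · omega
          · obtain ⟨h1,h2,h3,h4,h5,h6,h7,h8,hcnt,-⟩ := h
            have : ¬(a < 0 ∨ a < 0 ∨ a < 0 ∨ d < 0) := fun hneg =>
              hnd ⟨hlen, h1,h2,h3,h4,h5,h6,h7,h8, hneg, hcnt⟩
            omega
        obtain ⟨hx0,hx6,hy0,hy6⟩ := hb
        interval_cases a <;> interval_cases d <;> first
          | exact absurd rfl had
          | rfl
    · by_cases had : a = d
      · subst had
        -- a a c a
        have hlen : (PySem.Set.ofList [a, a, c, a]).length = 2 := by
          simp only [PySem.Set.ofList, PySem.Set.add, PySem.Set.contains, List.foldl]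
          split_ifs <;> simp_all <;> tauto
        have hb : 0 ≤ a ∧ a ≤ 6 ∧ 0 ≤ c ∧ c ≤ 6 := by
          rcases hpre hlen with h | h
          · omega
          · obtain ⟨h1,h2,h3,h4,h5,h6,h7,h8,hcnt,-⟩ := h
            have : ¬(a < 0 ∨ a < 0 ∨ c < 0 ∨ a < 0) := fun hneg =>
              hnd ⟨hlen, h1,h2,h3,h4,h5,h6,h7,h8, hneg, hcnt⟩
            omega
        obtain ⟨hx0,hx6,hy0,hy6⟩ := hb
        interval_cases a <;> interval_cases c <;> first
          | exact absurd rfl hac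
          | rfl
      · by_cases hcd : c = d
        · subst hcd
          -- a a c c
          have hlen : (PySem.Set.ofList [a, a, c, c]).length = 2 := by
            simp only [PySem.Set.ofList, PySem.Set.add, PySem.Set.contains, List.foldl]
            split_ifs <;> simp_all <;> tauto
          have hb : 0 ≤ a ∧ a ≤ 6 ∧ 0 ≤ c ∧ c ≤ 6 := by
            rcases hpre hlen with h | h
            · omega
            · obtain ⟨h1,h2,h3,h4,h5,h6,h7,h8,hcnt,-⟩ := h
              have : ¬(a < 0 ∨ a < 0 ∨ c < 0 ∨ c < 0) := fun hneg =>
                hnd ⟨hlen, h1,h2,h3,h4,h5,h6,h7,h8, hneg, hcnt⟩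
              omega
          obtain ⟨hx0,hx6,hy0,hy6⟩ := hb
          interval_cases a <;> interval_cases c <;> first
            | exact absurd rfl hac
            | rfl
        · -- a a c d, three distinct
          have hlen : (PySem.Set.ofList [a, a, c, d]).length = 3 := by
            simp only [PySem.Set.ofList, PySem.Set.add, PySem.Set.contains, List.foldl]
            split_ifs <;> simp_all <;> tauto
          have hA : check a a c d = (0, c, d, 4) := by simp [check, hlen]
          rw [hA]; exact (alt_pair12 a c d hac had hcd).symm
  · by_cases hac : a = c
    · subst hac
      by_cases hbd : b = d
      · subst hbd
        -- a b a b
        have hlen : (PySem.Set.ofList [a, b, a, b]).length = 2 := by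
          simp only [PySem.Set.ofList, PySem.Set.add, PySem.Set.contains, List.foldl]
          split_ifs <;> simp_all <;> tauto
        have hb : 0 ≤ a ∧ a ≤ 6 ∧ 0 ≤ b ∧ b ≤ 6 := by
          rcases hpre hlen with h | h
          · omega
          · obtain ⟨h1,h2,h3,h4,h5,h6,h7,h8,hcnt,-⟩ := h
            have : ¬(a < 0 ∨ b < 0 ∨ a < 0 ∨ b < 0) := fun hneg =>
              hnd ⟨hlen, h1,h2,h3,h4,h5,h6,h7,h8, hneg, hcnt⟩
            omega
        obtain ⟨hx0,hx6,hy0,hy6⟩ := hb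
        interval_cases a <;> interval_cases b <;> first
          | exact absurd rfl hab
          | rfl
      · by_cases had : a = d
        · subst had
          -- a b a a
          have hlen : (PySem.Set.ofList [a, b, a, a]).length = 2 := by
            simp only [PySem.Set.ofList, PySem.Set.add, PySem.Set.contains, List.foldl]
            split_ifs <;> simp_all <;> tauto
          have hb : 0 ≤ a ∧ a ≤ 6 ∧ 0 ≤ b ∧ b ≤ 6 := by
            rcases hpre hlen with h | h
            · omega
            · obtain ⟨h1,h2,h3,h4,h5,h6,h7,h8,hcnt,-⟩ := h
              have : ¬(a < 0 ∨ b < 0 ∨ a < 0 ∨ a < 0) := fun hneg =>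
                hnd ⟨hlen, h1,h2,h3,h4,h5,h6,h7,h8, hneg, hcnt⟩
              omega
          obtain ⟨hx0,hx6,hy0,hy6⟩ := hb
          interval_cases a <;> interval_cases b <;> first
            | exact absurd rfl hab
            | rfl
        · -- a b a d, three distinct
          have hlen : (PySem.Set.ofList [a, b, a, d]).length = 3 := by
            simp only [PySem.Set.ofList, PySem.Set.add, PySem.Set.contains, List.foldl]
            split_ifs <;> simp_all <;> tauto
          have hA : check a b a d = (0, b, d, 4) := by simp [check, hlen, hab]
          rw [hA]; exact (alt_pair13 a b d hab had hbd).symm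
    · by_cases had : a = d
      · subst had
        by_cases hbc : b = c
        · subst hbc
          -- a b b a
          have hlen : (PySem.Set.ofList [a, b, b, a]).length = 2 := by
            simp only [PySem.Set.ofList, PySem.Set.add, PySem.Set.contains, List.foldl]
            split_ifs <;> simp_all <;> tauto
          have hb : 0 ≤ a ∧ a ≤ 6 ∧ 0 ≤ b ∧ b ≤ 6 := by
            rcases hpre hlen with h | h
            · omega
            · obtain ⟨h1,h2,h3,h4,h5,h6,h7,h8,hcnt,-⟩ := h
              have : ¬(a < 0 ∨ b < 0 ∨ b < 0 ∨ a < 0) := fun hneg =>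
                hnd ⟨hlen, h1,h2,h3,h4,h5,h6,h7,h8, hneg, hcnt⟩
              omega
          obtain ⟨hx0,hx6,hy0,hy6⟩ := hb
          interval_cases a <;> interval_cases b <;> first
            | exact absurd rfl hab
            | rfl
        · -- a b c a, three distinct
          have hlen : (PySem.Set.ofList [a, b, c, a]).length = 3 := by
            simp only [PySem.Set.ofList, PySem.Set.add, PySem.Set.contains, List.foldl]
            split_ifs <;> simp_all <;> tauto
          have hA : check a b c a = (0, b, c, 4) := by simp [check, hlen, hab, hac]
          rw [hA]; exact (alt_pair14 a b c hab hac hbc).symm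
      · by_cases hbc : b = c
        · subst hbc
          by_cases hbd : b = d
          · subst hbd
            -- a b b b
            have hlen : (PySem.Set.ofList [a, b, b, b]).length = 2 := by
              simp only [PySem.Set.ofList, PySem.Set.add, PySem.Set.contains, List.foldl]
              split_ifs <;> simp_all <;> tauto
            have hb : 0 ≤ a ∧ a ≤ 6 ∧ 0 ≤ b ∧ b ≤ 6 := by
              rcases hpre hlen with h | h
              · omega
              · obtain ⟨h1,h2,h3,h4,h5,h6,h7,h8,hcnt,-⟩ := h
                have : ¬(a < 0 ∨ b < 0 ∨ b < 0 ∨ b < 0) := fun hneg =>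
                  hnd ⟨hlen, h1,h2,h3,h4,h5,h6,h7,h8, hneg, hcnt⟩
                omega
            obtain ⟨hx0,hx6,hy0,hy6⟩ := hb
            interval_cases a <;> interval_cases b <;> first
              | exact absurd rfl hab
              | rfl
          · -- a b b d, three distinct
            have hlen : (PySem.Set.ofList [a, b, b, d]).length = 3 := by
              simp only [PySem.Set.ofList, PySem.Set.add, PySem.Set.contains, List.foldl]
              split_ifs <;> simp_all <;> tauto
            have hA : check a b b d = (0, a, d, 4) := by simp [check, hlen, hab, had]
            rw [hA]; exact (alt_pair23 b a d (Ne.symm hab) hbd had).symm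
        · by_cases hbd : b = d
          · subst hbd
            -- a b c b, three distinct
            have hlen : (PySem.Set.ofList [a, b, c, b]).length = 3 := by
              simp only [PySem.Set.ofList, PySem.Set.add, PySem.Set.contains, List.foldl]
              split_ifs <;> simp_all <;> tauto
            have hA : check a b c b = (0, a, c, 4) := by simp [check, hlen, hab, hac, hbc]
            rw [hA]; exact (alt_pair24 b a c (Ne.symm hab) hbc hac).symm
          · by_cases hcd : c = d
            · subst hcd
              -- a b c c, three distinct
              have hlen : (PySem.Set.ofList [a, b, c, c]).length = 3 := by
                simp only [PySem.Set.ofList, PySem.Set.add, PySem.Set.contains, List.foldl]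
                split_ifs <;> simp_all <;> tauto
              have hA : check a b c c = (0, a, b, 4) := by simp [check, hlen, hab, hac, hbc]
              rw [hA]; exact (alt_pair34 c a b (Ne.symm hac) (Ne.symm hbc) hab).symm
            · -- a b c d, all distinct
              have hlen : (PySem.Set.ofList [a, b, c, d]).length = 4 := by
                simp only [PySem.Set.ofList, PySem.Set.add, PySem.Set.contains, List.foldl]
                split_ifs <;> simp_all <;> tauto
              have hA : check a b c d = (0, 0, 0, 5) := by simp [check, hlen, hab, hac, had, hbc, hbd, hcd]
              rw [hA]; exact (alt_distinct a b c d hab hac had hbc hbd hcd).symm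

set_option maxHeartbeats 1000000 in
theorem check_tight : Claim_exact_check := by
  intro a b c d _ hpre hd
  by_cases hab : a = b
  · subst hab
    by_cases hac : a = c
    · subst hac
      by_cases had : a = d
      · subst had
        exfalso
        have hlen : (PySem.Set.ofList [a, a, a, a]).length = 1 := by
          simp only [PySem.Set.ofList, PySem.Set.add, PySem.Set.contains, List.foldl]
          split_ifs <;> simp_all <;> tauto
        have h2 := hd.1
        omega
      · -- a a a d
        have hlen : (PySem.Set.ofList [a, a, a, d]).length = 2 := by
          simp only [PySem.Set.ofList, PySem.Set.add, PySem.Set.contains, List.foldl]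
          split_ifs <;> simp_all <;> tauto
        obtain ⟨-, hb1,hb2,hb3,hb4,hb5,hb6,hb7,hb8, hneg, -⟩ := hd
        interval_cases a <;> interval_cases d <;> first
          | exact absurd rfl had
          | exact ne_of_beq_false rfl
          | exact absurd hneg (by omega)
    · by_cases had : a = d
      · subst had
        -- a a c a
        have hlen : (PySem.Set.ofList [a, a, c, a]).length = 2 := by
          simp only [PySem.Set.ofList, PySem.Set.add, PySem.Set.contains, List.foldl]
          split_ifs <;> simp_all <;> tauto
        obtain ⟨-, hb1,hb2,hb3,hb4,hb5,hb6,hb7,hb8, hneg, -⟩ := hd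
        interval_cases a <;> interval_cases c <;> first
          | exact absurd rfl hac
          | exact ne_of_beq_false rfl
          | exact absurd hneg (by omega)
      · by_cases hcd : c = d
        · subst hcd
          -- a a c c (2+2 split: D_check's 3+1 count condition fails)
          exfalso
          obtain ⟨-,-,-,-,-,-,-,-,-,-,hcnt⟩ := hd
          have hc : PySem.List.count [a, a, c, c] a = 2 := by
            simp [PySem.List.count, List.count_cons, hac, Ne.symm hac]
          omega
        · -- a a c d
          exfalso
          have hlen : (PySem.Set.ofList [a, a, c, d]).length = 3 := by
            simp only [PySem.Set.ofList, PySem.Set.add, PySem.Set.contains, List.foldl]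
            split_ifs <;> simp_all <;> tauto
          have h2 := hd.1
          omega
  · by_cases hac : a = c
    · subst hac
      by_cases hbd : b = d
      · subst hbd
        -- a b a b (2+2)
        exfalso
        obtain ⟨-,-,-,-,-,-,-,-,-,-,hcnt⟩ := hd
        have hc : PySem.List.count [a, b, a, b] a = 2 := by
          simp [PySem.List.count, List.count_cons, hab, Ne.symm hab]
        omega
      · by_cases had : a = d
        · subst had
          -- a b a a
          have hlen : (PySem.Set.ofList [a, b, a, a]).length = 2 := by
            simp only [PySem.Set.ofList, PySem.Set.add, PySem.Set.contains, List.foldl]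
            split_ifs <;> simp_all <;> tauto
          obtain ⟨-, hb1,hb2,hb3,hb4,hb5,hb6,hb7,hb8, hneg, -⟩ := hd
          interval_cases a <;> interval_cases b <;> first
            | exact absurd rfl hab
            | exact ne_of_beq_false rfl
            | exact absurd hneg (by omega)
        · -- a b a d
          exfalso
          have hlen : (PySem.Set.ofList [a, b, a, d]).length = 3 := by
            simp only [PySem.Set.ofList, PySem.Set.add, PySem.Set.contains, List.foldl]
            split_ifs <;> simp_all <;> tauto
          have h2 := hd.1
          omega
    · by_cases had : a = d
      · subst had
        by_cases hbc : b = c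
        · subst hbc
          -- a b b a (2+2)
          exfalso
          obtain ⟨-,-,-,-,-,-,-,-,-,-,hcnt⟩ := hd
          have hc : PySem.List.count [a, b, b, a] a = 2 := by
            simp [PySem.List.count, List.count_cons, hab, Ne.symm hab]
          omega
        · -- a b c a
          exfalso
          have hlen : (PySem.Set.ofList [a, b, c, a]).length = 3 := by
            simp only [PySem.Set.ofList, PySem.Set.add, PySem.Set.contains, List.foldl]
            split_ifs <;> simp_all <;> tauto
          have h2 := hd.1
          omega
      · by_cases hbc : b = c
        · subst hbc
          by_cases hbd : b = d
          · subst hbd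
            -- a b b b
            have hlen : (PySem.Set.ofList [a, b, b, b]).length = 2 := by
              simp only [PySem.Set.ofList, PySem.Set.add, PySem.Set.contains, List.foldl]
              split_ifs <;> simp_all <;> tauto
            obtain ⟨-, hb1,hb2,hb3,hb4,hb5,hb6,hb7,hb8, hneg, -⟩ := hd
            interval_cases a <;> interval_cases b <;> first
              | exact absurd rfl hab
              | exact ne_of_beq_false rfl
              | exact absurd hneg (by omega)
          · -- a b b d
            exfalso
            have hlen : (PySem.Set.ofList [a, b, b, d]).length = 3 := by
              simp only [PySem.Set.ofList, PySem.Set.add, PySem.Set.contains, List.foldl]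
              split_ifs <;> simp_all <;> tauto
            have h2 := hd.1
            omega
        · by_cases hbd : b = d
          · subst hbd
            -- a b c b
            exfalso
            have hlen : (PySem.Set.ofList [a, b, c, b]).length = 3 := by
              simp only [PySem.Set.ofList, PySem.Set.add, PySem.Set.contains, List.foldl]
              split_ifs <;> simp_all <;> tauto
            have h2 := hd.1
            omega
          · by_cases hcd : c = d
            · subst hcd
              -- a b c c
              exfalso
              have hlen : (PySem.Set.ofList [a, b, c, c]).length = 3 := by
                simp only [PySem.Set.ofList, PySem.Set.add, PySem.Set.contains, List.foldl]
                split_ifs <;> simp_all <;> tauto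
              have h2 := hd.1
              omega
            · -- a b c d
              exfalso
              have hlen : (PySem.Set.ofList [a, b, c, d]).length = 4 := by
                simp only [PySem.Set.ofList, PySem.Set.add, PySem.Set.contains, List.foldl]
                split_ifs <;> simp_all <;> tauto
              have h2 := hd.1
              omega

theorem check_changed : Claim_changed_check := by
  unfold Claim_changed_check
  exact ⟨by decide, by decide, by decide, rfl, rfl, by decide⟩
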